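-- pv_equiv track=rewrite | github.com/g-barla/postapply-rl | src/rl_algorithms/thompson_sampling.py | _get_context_key
-- ===== SOURCE A (Python) =====
-- def _get_context_key(
--
--     contact_title: str,
--     company_culture: str,
--     has_connection: bool
-- ) -> str:
--     """
--     Convert context tuple to string key
--
--     Args:
--         contact_title: 'recruiter', 'manager', 'director', 'vp', etc.
--         company_culture: 'casual', 'formal', 'mixed'
--         has_connection: True/False
--
--     Returns:
--         Context key string (e.g., "recruiter_casual_True")
--     """
--     # Simplify title categories
--     title_lower = contact_title.lower()
--
--     if any(word in title_lower for word in ['recruit', 'talent', 'hr']):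
--         title_category = 'recruiter'
--     elif any(word in title_lower for word in ['vp', 'vice president', 'chief', 'head']):
--         title_category = 'executive'
--     elif any(word in title_lower for word in ['director', 'lead']):
--         title_category = 'director'
--     else:
--         title_category = 'manager'
--
--     return f"{title_category}_{company_culture}_{has_connection}"
-- ===== SOURCE B (Python) =====
-- _KEYWORDS = [
--     ("recruit", 0), ("talent", 0), ("hr", 0),
--     ("vp", 1), ("vice president", 1), ("chief", 1), ("head", 1),
--     ("director", 2), ("lead", 2),
-- ]
-- _CATS = ["recruiter", "executive", "director", "manager"]
--
--
-- def _get_context_key(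
--     contact_title: str,
--     company_culture: str,
--     has_connection: bool
-- ) -> str:
--     """Single running-minimum pass over a flattened (keyword, priority) list:
--     every keyword is tested, the best (smallest) priority seen wins, and the
--     category is looked up in a table (priority 3 = no match = 'manager')."""
--     title_lower = contact_title.lower()
--     best = 3
--     for kw, prio in _KEYWORDS:
--         if kw in title_lower and prio < best:
--             best = prio
--     return f"{_CATS[best]}_{company_culture}_{has_connection}"
-- ===== Notes on version B (the rewrite author's own statement) =====
-- stated objective: alternative
-- what changed: Replaces the short-circuiting if/elif chain of any() group tests by a single exhaustive running-minimum fold over a flattened (keyword, priority) list, with the final category looked up by priority in a table.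
import Mathlib
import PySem

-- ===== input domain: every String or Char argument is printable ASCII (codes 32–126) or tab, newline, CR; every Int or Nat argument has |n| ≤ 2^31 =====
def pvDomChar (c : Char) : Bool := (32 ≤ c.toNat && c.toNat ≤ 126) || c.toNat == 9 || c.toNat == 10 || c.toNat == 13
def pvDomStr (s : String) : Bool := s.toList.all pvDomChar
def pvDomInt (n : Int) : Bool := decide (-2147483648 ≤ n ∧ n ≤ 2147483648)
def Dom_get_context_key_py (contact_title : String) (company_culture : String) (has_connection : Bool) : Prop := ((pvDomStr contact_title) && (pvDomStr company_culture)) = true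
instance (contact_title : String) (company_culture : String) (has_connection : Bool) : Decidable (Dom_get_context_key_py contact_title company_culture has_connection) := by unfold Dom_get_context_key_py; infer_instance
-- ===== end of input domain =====

-- B replaces the short-circuiting if/elif chain of any() group tests by one exhaustive
-- running-minimum fold over flattened (keyword, priority) pairs plus a category table lookup
-- (alternative decomposition; same cost).
-- ===== PORT A =====
def get_context_key_py (contact_title : String) (company_culture : String) (has_connection : Bool) : String :=
  let title_lower := PySem.Str.lower contact_title
  let title_category :=
    if ["recruit", "talent", "hr"].any (fun word => PySem.Str.isIn word title_lower) then
      "recruiter"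
    else if ["vp", "vice president", "chief", "head"].any (fun word => PySem.Str.isIn word title_lower) then
      "executive"
    else if ["director", "lead"].any (fun word => PySem.Str.isIn word title_lower) then
      "director"
    else
      "manager"
  title_category ++ "_" ++ company_culture ++ "_" ++ (if has_connection then "True" else "False")

-- ===== PORT B =====
def pvKeywords : List (String × Nat) :=
  [("recruit", 0), ("talent", 0), ("hr", 0),
   ("vp", 1), ("vice president", 1), ("chief", 1), ("head", 1),
   ("director", 2), ("lead", 2)]

def pvCats : List String := ["recruiter", "executive", "director", "manager"]

-- loop body of Source B: `if kw in title_lower and prio < best: best = prio`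
def pvStep (title_lower : String) (best : Nat) (kp : String × Nat) : Nat :=
  if PySem.Str.isIn kp.1 title_lower && decide (kp.2 < best) then kp.2 else best

def get_context_key_py_alt (contact_title : String) (company_culture : String) (has_connection : Bool) : String :=
  let title_lower := PySem.Str.lower contact_title
  let best := pvKeywords.foldl (pvStep title_lower) 3
  -- `_CATS[best]`: best ≤ 3 < len(_CATS) always, so Python never raises here
  (PySem.List.pyGet? pvCats (best : Int)).getD "" ++ "_" ++ company_culture ++ "_" ++
    (if has_connection then "True" else "False")

-- ===== PRECONDITION & SPEC =====
def Spec_get_context_key_py (contact_title : String) (company_culture : String) (has_connection : Bool) (out : String) : Prop := out = get_context_key_py_alt contact_title company_culture has_connection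
instance (contact_title : String) (company_culture : String) (has_connection : Bool) (out : String) : Decidable (Spec_get_context_key_py contact_title company_culture has_connection out) := by unfold Spec_get_context_key_py; infer_instance

-- ===== CLAIM =====
def Claim_equal_get_context_key_py : Prop := ∀ (contact_title : String) (company_culture : String) (has_connection : Bool), Dom_get_context_key_py contact_title company_culture has_connection → Spec_get_context_key_py contact_title company_culture has_connection (get_context_key_py contact_title company_culture has_connection)

-- ===== LEMMAS AND PROOFS =====

theorem pv_step_le (tl : String) (b : Nat) (kp : String × Nat) : pvStep tl b kp ≤ b := by
  unfold pvStep
  by_cases hc : (PySem.Str.isIn kp.1 tl && decide (kp.2 < b)) = true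
  · rw [if_pos hc]
    rcases Bool.and_eq_true _ _ |>.mp hc with ⟨_, h2⟩
    exact le_of_lt (of_decide_eq_true h2)
  · rw [if_neg hc]

theorem pv_fold_le_init (tl : String) (L : List (String × Nat)) :
    ∀ b : Nat, L.foldl (pvStep tl) b ≤ b := by
  induction L with
  | nil => intro b; exact le_refl b
  | cons hd t ih =>
    intro b
    exact le_trans (ih (pvStep tl b hd)) (pv_step_le tl b hd)

theorem pv_fold_le_matched (tl : String) (L : List (String × Nat)) :
    ∀ (b : Nat) (kp : String × Nat), kp ∈ L → PySem.Str.isIn kp.1 tl = true →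
      L.foldl (pvStep tl) b ≤ kp.2 := by
  induction L with
  | nil => intro b kp h; cases h
  | cons hd t ih =>
    intro b kp hmem hc
    rcases List.mem_cons.mp hmem with heq | ht
    · subst heq
      have h1 : pvStep tl b kp ≤ kp.2 := by
        unfold pvStep
        rw [hc, Bool.true_and]
        by_cases hlt : kp.2 < b
        · simp [hlt]
        · simp [hlt]; omega
      exact le_trans (pv_fold_le_init tl t _) h1
    · exact ih _ _ ht hc

theorem pv_fold_mem (tl : String) (L : List (String × Nat)) :
    ∀ b : Nat, L.foldl (pvStep tl) b = b ∨
      ∃ kp, kp ∈ L ∧ PySem.Str.isIn kp.1 tl = true ∧ L.foldl (pvStep tl) b = kp.2 := by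
  induction L with
  | nil => intro b; left; rfl
  | cons hd t ih =>
    intro b
    have hfold : (hd :: t).foldl (pvStep tl) b = t.foldl (pvStep tl) (pvStep tl b hd) := rfl
    rcases ih (pvStep tl b hd) with h | ⟨kp, hm, hc, he⟩
    · by_cases hcond : (PySem.Str.isIn hd.1 tl && decide (hd.2 < b)) = true
      · right
        refine ⟨hd, List.mem_cons_self, (Bool.and_eq_true _ _ |>.mp hcond).1, ?_⟩
        rw [hfold, h]; unfold pvStep; rw [if_pos hcond]
      · left
        rw [hfold, h]; unfold pvStep; rw [if_neg hcond]
    · right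
      exact ⟨kp, List.mem_cons_of_mem hd hm, hc, by rw [hfold]; exact he⟩

theorem pv_cat_congr (c t x y : String) (h : x = y) :
    x ++ "_" ++ c ++ "_" ++ t = y ++ "_" ++ c ++ "_" ++ t := by rw [h]

-- ===== VERDICT =====
theorem get_context_key_py_spec : Claim_equal_get_context_key_py := by
  intro contact_title company_culture has_connection _
  unfold Spec_get_context_key_py get_context_key_py get_context_key_py_alt
  apply pv_cat_congr
  simp only [List.any_cons, List.any_nil, Bool.or_eq_true, Bool.or_false]
  set tl := PySem.Str.lower contact_title with htl
  set best := pvKeywords.foldl (pvStep tl) 3 with hbestdef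
  split_ifs with hg0 hg1 hg2
  · -- group 0 matched: best = 0
    have hle : best ≤ 0 := by
      rcases hg0 with h | h | h
      · exact pv_fold_le_matched tl pvKeywords 3 ("recruit", 0) (by decide) h
      · exact pv_fold_le_matched tl pvKeywords 3 ("talent", 0) (by decide) h
      · exact pv_fold_le_matched tl pvKeywords 3 ("hr", 0) (by decide) h
    have hb : best = 0 := Nat.le_zero.mp hle
    rw [hb]; decide
  · -- group 1 matched, group 0 not: best = 1
    simp only [not_or, Bool.not_eq_true] at hg0
    obtain ⟨h01, h02, h03⟩ := hg0
    have hle : best ≤ 1 := by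
      rcases hg1 with h | h | h | h
      · exact pv_fold_le_matched tl pvKeywords 3 ("vp", 1) (by decide) h
      · exact pv_fold_le_matched tl pvKeywords 3 ("vice president", 1) (by decide) h
      · exact pv_fold_le_matched tl pvKeywords 3 ("chief", 1) (by decide) h
      · exact pv_fold_le_matched tl pvKeywords 3 ("head", 1) (by decide) h
    have hb : best = 1 := by
      rcases pv_fold_mem tl pvKeywords 3 with h3 | ⟨kp, hm, hc, he⟩
      · rw [← hbestdef] at h3; omega
      · rw [← hbestdef] at he
        simp only [pvKeywords, List.mem_cons, List.not_mem_nil, or_false] at hm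
        rcases hm with rfl | rfl | rfl | rfl | rfl | rfl | rfl | rfl | rfl <;>
          first
            | (exact he)
            | (rw [h01] at hc; exact Bool.noConfusion hc) | (rw [h02] at hc; exact Bool.noConfusion hc) | (rw [h03] at hc; exact Bool.noConfusion hc)
            | (have he2 : best = 2 := he; omega)
    rw [hb]; decide
  · -- group 2 matched, groups 0,1 not: best = 2
    simp only [not_or, Bool.not_eq_true] at hg0 hg1
    obtain ⟨h01, h02, h03⟩ := hg0
    obtain ⟨h11, h12, h13, h14⟩ := hg1
    have hle : best ≤ 2 := by
      rcases hg2 with h | h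
      · exact pv_fold_le_matched tl pvKeywords 3 ("director", 2) (by decide) h
      · exact pv_fold_le_matched tl pvKeywords 3 ("lead", 2) (by decide) h
    have hb : best = 2 := by
      rcases pv_fold_mem tl pvKeywords 3 with h3 | ⟨kp, hm, hc, he⟩
      · rw [← hbestdef] at h3; omega
      · rw [← hbestdef] at he
        simp only [pvKeywords, List.mem_cons, List.not_mem_nil, or_false] at hm
        rcases hm with rfl | rfl | rfl | rfl | rfl | rfl | rfl | rfl | rfl <;>
          first
            | (exact he)
            | (rw [h01] at hc; exact Bool.noConfusion hc) | (rw [h02] at hc; exact Bool.noConfusion hc) | (rw [h03] at hc; exact Bool.noConfusion hc)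
            | (rw [h11] at hc; exact Bool.noConfusion hc) | (rw [h12] at hc; exact Bool.noConfusion hc) | (rw [h13] at hc; exact Bool.noConfusion hc)
            | (rw [h14] at hc; exact Bool.noConfusion hc)
    rw [hb]; decide
  · -- nothing matched: best = 3
    simp only [not_or, Bool.not_eq_true] at hg0 hg1 hg2
    obtain ⟨h01, h02, h03⟩ := hg0
    obtain ⟨h11, h12, h13, h14⟩ := hg1
    obtain ⟨h21, h22⟩ := hg2
    have hb : best = 3 := by
      rcases pv_fold_mem tl pvKeywords 3 with h3 | ⟨kp, hm, hc, he⟩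
      · rw [← hbestdef] at h3; exact h3
      · simp only [pvKeywords, List.mem_cons, List.not_mem_nil, or_false] at hm
        rcases hm with rfl | rfl | rfl | rfl | rfl | rfl | rfl | rfl | rfl <;>
          first
            | (rw [h01] at hc; exact Bool.noConfusion hc) | (rw [h02] at hc; exact Bool.noConfusion hc) | (rw [h03] at hc; exact Bool.noConfusion hc)
            | (rw [h11] at hc; exact Bool.noConfusion hc) | (rw [h12] at hc; exact Bool.noConfusion hc) | (rw [h13] at hc; exact Bool.noConfusion hc)
            | (rw [h14] at hc; exact Bool.noConfusion hc) | (rw [h21] at hc; exact Bool.noConfusion hc) | (rw [h22] at hc; exact Bool.noConfusion hc)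
    rw [hb]; decide
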